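-- pv_equiv track=rewrite | github.com/tahnhuy/2d_array_python | square_matrix.py | swapRow
-- ===== SOURCE A (Python) =====
-- def swapRow(list, level):
--     position = []
--     result = []
--     sumRow = []
--     sum = 0
--     for i in range(level):
--         position.append(i)
--         for j in range(level):
--             sum += list[i][j]
--         sumRow.append(sum)
--         sum = 0
--
--     for i in range(level - 1):
--         for j in range(level - i - 1):
--             if sumRow[j] < sumRow[j + 1]:
--                 temp1 = sumRow[j]
--                 sumRow[j] = sumRow[j + 1]
--                 sumRow[j + 1] = temp1
--
--                 temp = position[j]
--                 position[j] = position[j + 1]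
--                 position[j + 1] = temp
--
--     for i in range(level):
--         row = []
--         for j in range(level):
--             value = list[position[i]][j]
--             row.append(value)
--         result.append(row)
--
--     return result
-- ===== SOURCE B (Python) =====
-- def swapRow(list, level):
--     sums = [sum(list[i][j] for j in range(level)) for i in range(level)]
--     order = sorted(range(level), key=lambda i: sums[i], reverse=True)
--     return [[list[i][j] for j in range(level)] for i in order]
-- ===== Notes on version B (the rewrite author's own statement) =====
-- stated objective: simpler
-- what changed: The hand-written stable descending bubble sort over parallel position/sum lists is replaced by one stable library sort of the row indices by row-sum with reverse=True, then a single rebuild of the rows.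
import Mathlib
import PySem

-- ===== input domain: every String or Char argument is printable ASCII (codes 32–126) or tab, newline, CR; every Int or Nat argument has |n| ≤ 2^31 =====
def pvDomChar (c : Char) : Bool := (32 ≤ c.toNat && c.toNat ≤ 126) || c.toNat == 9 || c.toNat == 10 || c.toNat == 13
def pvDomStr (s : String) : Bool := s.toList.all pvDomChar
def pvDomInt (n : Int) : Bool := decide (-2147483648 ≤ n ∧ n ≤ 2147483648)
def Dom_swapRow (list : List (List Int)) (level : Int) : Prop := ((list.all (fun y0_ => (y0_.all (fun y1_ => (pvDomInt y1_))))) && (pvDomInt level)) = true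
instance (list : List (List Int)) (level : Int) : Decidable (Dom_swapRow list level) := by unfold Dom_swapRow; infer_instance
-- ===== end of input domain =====

-- B replaces A's hand-written stable descending bubble sort of parallel position/sum lists
-- by one stable library sort of the row indices by row-sum (reverse=True) plus a rebuild.


-- ===== PORT A =====
def pySetIdx (xs : List Int) (i : Int) (v : Int) : List Int := xs.set i.toNat v

def swapRowSwap (st : List Int × List Int) (j : Int) : List Int × List Int :=
  if PySem.List.pyGetD st.2 j 0 < PySem.List.pyGetD st.2 (j + 1) 0 then
    let temp1 := PySem.List.pyGetD st.2 j 0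
    let sumRow := pySetIdx st.2 j (PySem.List.pyGetD st.2 (j + 1) 0)
    let sumRow := pySetIdx sumRow (j + 1) temp1
    let temp := PySem.List.pyGetD st.1 j 0
    let position := pySetIdx st.1 j (PySem.List.pyGetD st.1 (j + 1) 0)
    let position := pySetIdx position (j + 1) temp
    (position, sumRow)
  else st

def swapRow (list : List (List Int)) (level : Int) : List (List Int) :=
  let st1 : List Int × List Int × Int :=
    (PySem.List.pyRange 0 level).foldl (fun st i =>
      (st.1 ++ [i],
       st.2.1 ++ [(PySem.List.pyRange 0 level).foldl
         (fun s j => s + PySem.List.pyGetD (PySem.List.pyGetD list i []) j 0) st.2.2],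
       0)) ([], [], 0)
  let st2 : List Int × List Int :=
    (PySem.List.pyRange 0 (level - 1)).foldl (fun st i =>
      (PySem.List.pyRange 0 (level - i - 1)).foldl swapRowSwap st) (st1.1, st1.2.1)
  (PySem.List.pyRange 0 level).foldl (fun result i =>
    result ++ [(PySem.List.pyRange 0 level).foldl (fun row j =>
      row ++ [PySem.List.pyGetD (PySem.List.pyGetD list (PySem.List.pyGetD st2.1 i 0) []) j 0]) []]) []


-- ===== PORT B =====
def swapRow_alt (list : List (List Int)) (level : Int) : List (List Int) :=
  let sums : List Int := (PySem.List.pyRange 0 level).map (fun i =>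
    ((PySem.List.pyRange 0 level).map (fun j =>
      PySem.List.pyGetD (PySem.List.pyGetD list i []) j 0)).sum)
  let order : List Int := PySem.List.sorted (PySem.List.pyRange 0 level)
    (fun i => PySem.List.pyGetD sums i 0) true
  order.map (fun i => (PySem.List.pyRange 0 level).map (fun j =>
    PySem.List.pyGetD (PySem.List.pyGetD list i []) j 0))


-- ===== PRECONDITION & SPEC =====
-- Pre_ excludes exactly the inputs where the Python A raises IndexError: there must be at
-- least level rows and each of the first level rows must have at least level entries.
def Pre_swapRow (list : List (List Int)) (level : Int) : Prop :=
  level ≤ (list.length : Int) ∧ ∀ r ∈ list.take level.toNat, level ≤ (r.length : Int)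
instance (list : List (List Int)) (level : Int) : Decidable (Pre_swapRow list level) := by unfold Pre_swapRow; infer_instance

def pvWitness_swapRow : List (List Int) × Int := ([[1, 2], [3, 4]], 2)

def Spec_swapRow (list : List (List Int)) (level : Int) (out : List (List Int)) : Prop := out = swapRow_alt list level
instance (list : List (List Int)) (level : Int) (out : List (List Int)) : Decidable (Spec_swapRow list level out) := by unfold Spec_swapRow; infer_instance

-- ===== CLAIM (what is proved, stated in full; the proofs are below) =====
def Claim_equal_swapRow : Prop := ∀ (list : List (List Int)) (level : Int), Dom_swapRow list level → Pre_swapRow list level → Spec_swapRow list level (swapRow list level)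

-- ===== LEMMAS AND PROOFS =====

def keyR (key : Int → Int) (a b : Int) : Prop := key b < key a ∨ (key a = key b ∧ a < b)
def keyT (key : Int → Int) (a b : Int) : Prop := key a = key b → a < b
def bpass (key : Int → Int) : Nat → List Int → List Int
  | m + 1, a :: b :: t => if key a < key b then b :: bpass key m (a :: t) else a :: bpass key m (b :: t)
  | _, l => l
def brec (key : Int → Int) : Nat → List Int → List Int
  | 0, l => l
  | m + 1, l => brec key m (bpass key (m + 1) l)

theorem bpass_perm (key : Int → Int) : ∀ (m : Nat) (l : List Int), (bpass key m l).Perm l := by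
  intro m
  induction m with
  | zero => intro l; cases l <;> simp [bpass]
  | succ m ih =>
    intro l
    match l with
    | [] => simp [bpass]
    | [a] => simp [bpass]
    | a :: b :: t =>
      rw [bpass]
      split
      · exact ((ih (a :: t)).cons b).trans (List.Perm.swap a b t)
      · exact (ih (b :: t)).cons a

theorem bpass_pairwiseT (key : Int → Int) : ∀ (m : Nat) (l : List Int),
    l.Pairwise (keyT key) → (bpass key m l).Pairwise (keyT key) := by
  intro m
  induction m with
  | zero => intro l h; cases l <;> simpa [bpass] using h
  | succ m ih =>
    intro l h
    match l with
    | [] => simp [bpass]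
    | [a] => simp [bpass]
    | a :: b :: t =>
      rw [List.pairwise_cons] at h
      obtain ⟨ha, hbt⟩ := h
      rw [List.pairwise_cons] at hbt
      obtain ⟨hb, ht⟩ := hbt
      rw [bpass]
      split
      · rename_i hab
        rw [List.pairwise_cons]
        refine ⟨?_, ih (a :: t) (List.pairwise_cons.mpr ⟨fun x hx => ha x (List.mem_cons_of_mem b hx), ht⟩)⟩
        intro x hx
        rw [(bpass_perm key m (a :: t)).mem_iff] at hx
        rcases List.mem_cons.mp hx with rfl | hx
        · intro e; omega
        · exact hb x hx
      · rename_i hab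
        rw [List.pairwise_cons]
        refine ⟨?_, ih (b :: t) (List.pairwise_cons.mpr ⟨hb, ht⟩)⟩
        intro x hx
        rw [(bpass_perm key m (b :: t)).mem_iff] at hx
        rcases List.mem_cons.mp hx with rfl | hx
        · exact ha x (List.mem_cons_self ..)
        · exact ha x (List.mem_cons_of_mem b hx)

theorem bpass_split (key : Int → Int) : ∀ (m : Nat) (l : List Int),
    l.Pairwise (keyT key) → m < l.length →
    ∃ p c, bpass key m l = p ++ c :: l.drop (m + 1) ∧ p.length = m ∧
      (p ++ [c]).Perm (l.take (m + 1)) ∧ ∀ x ∈ p, keyR key x c := by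
  intro m
  induction m with
  | zero =>
    intro l _ hl
    match l, hl with
    | a :: t, _ => exact ⟨[], a, by simp [bpass], rfl, by simp, by simp⟩
  | succ m ih =>
    intro l hT hl
    match l, hT, hl with
    | a :: b :: t, hT, hl =>
      rw [List.pairwise_cons] at hT
      obtain ⟨ha, hbt⟩ := hT
      rw [List.pairwise_cons] at hbt
      obtain ⟨hb, ht⟩ := hbt
      have hl' : m < t.length + 1 := by simp at hl; omega
      rw [bpass]
      split
      · rename_i hab
        have hT' : (a :: t).Pairwise (keyT key) :=
          List.pairwise_cons.mpr ⟨fun x hx => ha x (List.mem_cons_of_mem b hx), ht⟩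
        obtain ⟨p, c, he, hlen, hperm, hR⟩ := ih (a :: t) hT' (by simpa using hl')
        refine ⟨b :: p, c, by simp [he], by simp [hlen], ?_, ?_⟩
        · have h1 : ((b :: p) ++ [c] : List Int) = b :: (p ++ [c]) := by simp
          have h2 : (a :: t).take (m + 1) = a :: t.take m := by simp
          rw [h1, List.take_succ_cons, List.take_succ_cons]
          rw [h2] at hperm
          exact (hperm.cons b).trans (List.Perm.swap a b _)
        · intro x hx
          rcases List.mem_cons.mp hx with rfl | hx
          · have haIn : a ∈ p ++ [c] := hperm.mem_iff.mpr (by simp)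
            rcases List.mem_append.mp haIn with haP | haC
            · rcases hR a haP with h | ⟨h, _⟩ <;> exact Or.inl (by omega)
            · simp at haC; subst haC; exact Or.inl hab
          · exact hR x hx
      · rename_i hab
        have hT' : (b :: t).Pairwise (keyT key) := List.pairwise_cons.mpr ⟨hb, ht⟩
        obtain ⟨p, c, he, hlen, hperm, hR⟩ := ih (b :: t) hT' (by simpa using hl')
        refine ⟨a :: p, c, by simp [he], by simp [hlen], ?_, ?_⟩
        · have h1 : ((a :: p) ++ [c] : List Int) = a :: (p ++ [c]) := by simp
          rw [h1, List.take_succ_cons]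
          exact hperm.cons a
        · intro x hx
          rcases List.mem_cons.mp hx with rfl | hx
          · have hbIn : b ∈ p ++ [c] := hperm.mem_iff.mpr (by simp [List.take_succ_cons])
            have hcMem : c ∈ b :: t := List.mem_of_mem_take (hperm.mem_iff.mp (by simp))
            rcases List.mem_append.mp hbIn with hbP | hbC
            · rcases hR b hbP with h | ⟨h, hblt⟩
              · exact Or.inl (by omega)
              · rcases lt_or_eq_of_le (not_lt.mp hab) with h2 | h2
                · exact Or.inl (by omega)
                · refine Or.inr ⟨by omega, ?_⟩
                  have hcT : c ∈ t := by
                    rcases List.mem_cons.mp hcMem with rfl | h3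
                    · omega
                    · exact h3
                  exact ha c (List.mem_cons_of_mem b hcT) (by omega)
            · simp at hbC; subst hbC
              rcases lt_or_eq_of_le (not_lt.mp hab) with h2 | h2
              · exact Or.inl h2
              · exact Or.inr ⟨h2.symm, ha b (List.mem_cons_self ..) h2.symm⟩
          · exact hR x hx

theorem insertBy_eq_cons (b : Int → Int → Bool) (x y : Int) (ys : List Int) :
    PySem.List.insertBy b x (y :: ys) = if b x y then x :: y :: ys else y :: PySem.List.insertBy b x ys := rfl

theorem brec_sorted (key : Int → Int) : ∀ (m : Nat) (l : List Int),
    m < l.length → l.Pairwise (keyT key) →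
    (∀ x ∈ l.take (m + 1), ∀ y ∈ l.drop (m + 1), keyR key x y) →
    (l.drop (m + 1)).Pairwise (keyR key) →
    (brec key m l).Perm l ∧ (brec key m l).Pairwise (keyR key) := by
  intro m
  induction m with
  | zero =>
    intro l hl _ hcross hsuf
    match l, hl, hcross, hsuf with
    | a :: t, _, hcross, hsuf =>
      refine ⟨List.Perm.refl _, ?_⟩
      rw [show brec key 0 (a :: t) = a :: t from rfl, List.pairwise_cons]
      exact ⟨fun y hy => hcross a (by simp) y (by simpa using hy), by simpa using hsuf⟩
  | succ m ih =>
    intro l hl hT hcross hsuf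
    obtain ⟨p, c, he, hlen, hperm, hR⟩ := bpass_split key (m + 1) l hT hl
    have hpermL : (bpass key (m + 1) l).Perm l := bpass_perm key (m + 1) l
    have hlenL : (bpass key (m + 1) l).length = l.length := hpermL.length_eq
    have hT' : (bpass key (m + 1) l).Pairwise (keyT key) := bpass_pairwiseT key (m + 1) l hT
    have htake : (bpass key (m + 1) l).take (m + 1) = p := by rw [he]; exact List.take_left' hlen
    have hdrop : (bpass key (m + 1) l).drop (m + 1) = c :: l.drop (m + 2) := by
      rw [he]; exact List.drop_left' hlen
    have hmemTake : ∀ x ∈ p ++ [c], x ∈ l.take (m + 2) := fun x hx => hperm.mem_iff.mp hx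
    have hcross' : ∀ x ∈ (bpass key (m + 1) l).take (m + 1),
        ∀ y ∈ (bpass key (m + 1) l).drop (m + 1), keyR key x y := by
      rw [htake, hdrop]
      intro x hx y hy
      rcases List.mem_cons.mp hy with rfl | hy
      · exact hR x hx
      · exact hcross x (hmemTake x (List.mem_append.mpr (Or.inl hx))) y hy
    have hsuf' : ((bpass key (m + 1) l).drop (m + 1)).Pairwise (keyR key) := by
      rw [hdrop, List.pairwise_cons]
      exact ⟨fun y hy => hcross c (hmemTake c (by simp)) y hy, hsuf⟩
    obtain ⟨hp, hpw⟩ := ih (bpass key (m + 1) l) (by omega) hT' hcross' hsuf'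
    exact ⟨hp.trans hpermL, hpw⟩

theorem insertBy_pairwiseR (key : Int → Int) (x : Int) : ∀ (ys : List Int),
    ys.Pairwise (keyR key) → (∀ y ∈ ys, key y = key x → y < x) →
    (PySem.List.insertBy (fun a b => decide (key b < key a)) x ys).Pairwise (keyR key) := by
  intro ys
  induction ys with
  | nil => intro _ _; simp [PySem.List.insertBy, keyR]
  | cons y ys ih =>
    intro hpw hties
    rw [List.pairwise_cons] at hpw
    obtain ⟨hy, hys⟩ := hpw
    rw [insertBy_eq_cons]
    split
    · rename_i hlt
      simp only [decide_eq_true_eq] at hlt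
      rw [List.pairwise_cons]
      refine ⟨?_, List.pairwise_cons.mpr ⟨hy, hys⟩⟩
      intro z hz
      rcases List.mem_cons.mp hz with rfl | hz
      · exact Or.inl hlt
      · rcases hy z hz with h | ⟨h, _⟩ <;> exact Or.inl (by omega)
    · rename_i hge
      simp only [decide_eq_true_eq, not_lt] at hge
      rw [List.pairwise_cons]
      refine ⟨?_, ih hys (fun z hz => hties z (List.mem_cons_of_mem y hz))⟩
      intro z hz
      rw [PySem.List.mem_insertBy] at hz
      rcases hz with rfl | hz
      · rcases lt_or_eq_of_le hge with h | h
        · exact Or.inl h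
        · exact Or.inr ⟨h.symm, hties y (List.mem_cons_self ..) h.symm⟩
      · exact hy z hz

theorem sortedRev_pairwiseR (key : Int → Int) (xs : List Int)
    (h : xs.Pairwise (keyT key)) :
    (PySem.List.sorted xs key true).Pairwise (keyR key) := by
  have main : ∀ (l acc : List Int), acc.Pairwise (keyR key) →
      (∀ y ∈ acc, ∀ x ∈ l, key y = key x → y < x) → l.Pairwise (keyT key) →
      (l.foldl (fun acc x => PySem.List.insertBy (fun a b => decide (key b < key a)) x acc) acc).Pairwise (keyR key) := by
    intro l
    induction l with
    | nil => intro acc h1 _ _; exact h1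
    | cons x l ihl =>
      intro acc h1 h2 h3
      rw [List.pairwise_cons] at h3
      obtain ⟨hx, hl⟩ := h3
      rw [List.foldl_cons]
      refine ihl _ (insertBy_pairwiseR key x acc h1 (fun y hy => h2 y hy x (List.mem_cons_self ..))) ?_ hl
      intro y hy z hz
      rw [PySem.List.mem_insertBy] at hy
      rcases hy with rfl | hy
      · exact hx z hz
      · exact h2 y hy z (List.mem_cons_of_mem x hz)
  exact main xs [] (by simp) (by simp) h

theorem swap_zero (a b : Int) (t : List Int) (sa sb : Int) (sr : List Int) :
    swapRowSwap (a :: b :: t, sa :: sb :: sr) 0 =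
      if sa < sb then (b :: a :: t, sb :: sa :: sr) else (a :: b :: t, sa :: sb :: sr) := by
  simp [swapRowSwap, pySetIdx, PySem.List.pyGetD]

theorem swap_succ (k : Nat) (x : Int) (xs : List Int) (y : Int) (ys : List Int) :
    swapRowSwap (x :: xs, y :: ys) ((k : Int) + 1) =
      ((fun r : List Int × List Int => (x :: r.1, y :: r.2)) (swapRowSwap (xs, ys) (k : Int))) := by
  have h1 : ((k : Int) + 1) = ((k + 1 : Nat) : Int) := by push_cast; ring
  have h2 : ((k : Int) + 1 + 1) = ((k + 2 : Nat) : Int) := by push_cast; ring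
  simp only [swapRowSwap, pySetIdx, h2]
  simp only [h1]
  simp only [PySem.List.pyGetD_natCast, Int.toNat_natCast]
  split <;> rename_i h <;> simp only [List.getD, List.getElem?_cons_succ] at h <;> simp [h]

theorem fold_shift : ∀ (ks : List Nat) (x y : Int) (xs ys : List Int),
    (ks.foldl (fun (st : List Int × List Int) (k : Nat) => swapRowSwap st ((k : Int) + 1)) (x :: xs, y :: ys)) =
      (x :: (ks.foldl (fun (st : List Int × List Int) (k : Nat) => swapRowSwap st (k : Int)) (xs, ys)).1,
       y :: (ks.foldl (fun (st : List Int × List Int) (k : Nat) => swapRowSwap st (k : Int)) (xs, ys)).2) := by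
  intro ks
  induction ks with
  | nil => intro x y xs ys; rfl
  | cons k ks ih =>
    intro x y xs ys
    rw [List.foldl_cons, List.foldl_cons]
    simp only [swap_succ]
    exact ih x y (swapRowSwap (xs, ys) (k : Int)).1 (swapRowSwap (xs, ys) (k : Int)).2

theorem inner_fold_eq (key : Int → Int) : ∀ (m : Nat) (pos : List Int), m < pos.length →
    (PySem.List.pyRange 0 (m : Int)).foldl swapRowSwap (pos, pos.map key) =
      (bpass key m pos, (bpass key m pos).map key) := by
  intro m
  induction m with
  | zero =>
    intro pos _
    rw [PySem.List.pyRange_zero_natCast]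
    have : bpass key 0 pos = pos := by cases pos <;> rfl
    rw [this]
    rfl
  | succ m ih =>
    intro pos hlen
    match pos, hlen with
    | a :: b :: t, hlen =>
      rw [PySem.List.pyRange_zero_natCast, List.range_succ_eq_map]
      simp only [List.map_cons, List.foldl_cons, List.map_map, List.foldl_map]
      have hbody : (fun (x : List Int × List Int) (y : Nat) =>
          swapRowSwap x (((fun k : Nat => (k : Int)) ∘ Nat.succ) y)) =
          fun (st : List Int × List Int) (k : Nat) => swapRowSwap st ((k : Int) + 1) := by
        funext st k
        simp only [Function.comp_apply]
        congr 1
      rw [hbody]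
      simp only [Nat.cast_zero]
      rw [swap_zero]
      have hm : m < t.length + 1 := by simp at hlen; omega
      by_cases hab : key a < key b
      · rw [if_pos hab, fold_shift]
        have hih := ih (a :: t) (by simpa using hm)
        rw [PySem.List.pyRange_zero_natCast, List.foldl_map] at hih
        simp only [List.map_cons] at hih
        rw [hih, show bpass key (m + 1) (a :: b :: t) = b :: bpass key m (a :: t) from by
          rw [bpass, if_pos hab]]
        simp
      · rw [if_neg hab, fold_shift]
        have hih := ih (b :: t) (by simpa using hm)
        rw [PySem.List.pyRange_zero_natCast, List.foldl_map] at hih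
        simp only [List.map_cons] at hih
        rw [hih, show bpass key (m + 1) (a :: b :: t) = a :: bpass key m (b :: t) from by
          rw [bpass, if_neg hab]]
        simp

theorem bpass_length (key : Int → Int) (m : Nat) (l : List Int) : (bpass key m l).length = l.length :=
  (bpass_perm key m l).length_eq

theorem outer_fold_eq (key : Int → Int) (n : Nat) (hn : 0 < n) : ∀ (ks : List Nat),
    (∀ k ∈ ks, k + 1 ≤ n) → ∀ (pos : List Int), pos.length = n →
    ((ks.map (fun k : Nat => (k : Int))).foldl (fun st i =>
        (PySem.List.pyRange 0 ((n : Int) - i - 1)).foldl swapRowSwap st) (pos, pos.map key)) =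
      (ks.foldl (fun p k => bpass key (n - 1 - k) p) pos,
       (ks.foldl (fun p k => bpass key (n - 1 - k) p) pos).map key) := by
  intro ks
  induction ks with
  | nil => intro _ pos _; rfl
  | cons k ks ih =>
    intro hks pos hlen
    have hk : k + 1 ≤ n := hks k (List.mem_cons_self ..)
    simp only [List.map_cons, List.foldl_cons]
    have hcast : ((n : Int) - (k : Int) - 1) = ((n - 1 - k : Nat) : Int) := by
      push_cast [Nat.cast_sub (by omega : 1 ≤ n), Nat.cast_sub (by omega : k ≤ n - 1)]
      ring
    rw [hcast, inner_fold_eq key (n - 1 - k) pos (by omega)]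
    exact ih (fun k' hk' => hks k' (List.mem_cons_of_mem k hk'))
      (bpass key (n - 1 - k) pos) (by rw [bpass_length, hlen])

theorem fold_desc (key : Int → Int) : ∀ (s : Nat) (l : List Int),
    (List.range s).foldl (fun p k => bpass key (s - k) p) l = brec key s l := by
  intro s
  induction s with
  | zero => intro l; rfl
  | succ s ih =>
    intro l
    rw [List.range_succ_eq_map, List.foldl_cons, List.foldl_map]
    have hbody : (fun (p : List Int) (k : Nat) => bpass key (s + 1 - Nat.succ k) p) =
        fun (p : List Int) (k : Nat) => bpass key (s - k) p := by
      funext p k; congr 1; omega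
    rw [show s + 1 - 0 = s + 1 from rfl]
    rw [hbody, ih]
    rfl

theorem loop1 (list : List (List Int)) (level : Int) : ∀ (xs pos sr : List Int),
    xs.foldl (fun (st : List Int × List Int × Int) i =>
      (st.1 ++ [i],
       st.2.1 ++ [(PySem.List.pyRange 0 level).foldl
         (fun s j => s + PySem.List.pyGetD (PySem.List.pyGetD list i []) j 0) st.2.2],
       0)) (pos, sr, 0) =
    (pos ++ xs,
     sr ++ xs.map (fun i => (PySem.List.pyRange 0 level).foldl
       (fun s j => s + PySem.List.pyGetD (PySem.List.pyGetD list i []) j 0) 0),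
     0) := by
  intro xs
  induction xs with
  | nil => intro pos sr; simp
  | cons x xs ih =>
    intro pos sr
    rw [List.foldl_cons]
    simp only []
    rw [ih]
    simp

theorem keyR_antisymm (key : Int → Int) (a b : Int) (h1 : keyR key a b) (h2 : keyR key b a) : a = b := by
  rcases h1 with h1 | ⟨e1, l1⟩ <;> rcases h2 with h2 | ⟨e2, l2⟩ <;> omega

theorem main_eq (list : List (List Int)) (level : Int) :
    swapRow list level = swapRow_alt list level := by
  by_cases hpos : 0 < level
  · obtain ⟨n, rfl⟩ : ∃ n : Nat, level = (n : Int) := ⟨level.toNat, (Int.toNat_of_nonneg hpos.le).symm⟩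
    have hn : 0 < n := by exact_mod_cast hpos
    rw [swapRow, swapRow_alt]
    simp only [loop1, List.nil_append]
    have hSA : List.map (fun i =>
        List.foldl (fun s j => s + PySem.List.pyGetD (PySem.List.pyGetD list i []) j 0) 0
          (PySem.List.pyRange 0 (n : Int))) (PySem.List.pyRange 0 (n : Int)) =
        List.map (fun i =>
          (List.map (fun j => PySem.List.pyGetD (PySem.List.pyGetD list i []) j 0)
            (PySem.List.pyRange 0 (n : Int))).sum) (PySem.List.pyRange 0 (n : Int)) := by
      apply List.map_congr_left
      intro i _
      rw [PySem.List.foldl_add, zero_add]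
    rw [hSA]
    set S : List Int := List.map (fun i =>
        (List.map (fun j => PySem.List.pyGetD (PySem.List.pyGetD list i []) j 0)
          (PySem.List.pyRange 0 (n : Int))).sum) (PySem.List.pyRange 0 (n : Int)) with hS
    set key : Int → Int := fun i => PySem.List.pyGetD S i 0 with hkey
    set l0 : List Int := PySem.List.pyRange 0 (n : Int) with hl0
    have hl0r : l0 = List.map (fun k : Nat => (k : Int)) (List.range n) := by
      rw [hl0, PySem.List.pyRange_zero_natCast]
    have hl0len : l0.length = n := by rw [hl0r]; simp
    have hSlen : S.length = n := by rw [hS, List.length_map]; exact hl0len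
    have hmapkey : List.map key l0 = S := by
      have := PySem.List.map_pyGetD_pyRange_zero S 0
      have hlen' : PySem.List.len S = (n : Int) := by
        simp [PySem.List.len, hSlen]
      rw [hlen'] at this
      exact this
    -- the bubble fold computes brec
    have hbub : (PySem.List.pyRange 0 ((n : Int) - 1)).foldl (fun st i =>
        (PySem.List.pyRange 0 ((n : Int) - i - 1)).foldl swapRowSwap st) (l0, S) =
        (brec key (n - 1) l0, (brec key (n - 1) l0).map key) := by
      conv_lhs => rw [← hmapkey]
      have hc : ((n : Int) - 1) = ((n - 1 : Nat) : Int) := by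
        push_cast [Nat.cast_sub (by omega : 1 ≤ n)]; ring
      rw [hc, PySem.List.pyRange_zero_natCast]
      rw [outer_fold_eq key n hn (List.range (n - 1))
        (fun k hk => by have := List.mem_range.mp hk; omega) l0 hl0len]
      rw [fold_desc]
    rw [hbub]
    -- l0 ordering facts
    have hl0T : l0.Pairwise (keyT key) := by
      rw [hl0r]
      refine (List.pairwise_map).mpr ?_
      exact List.pairwise_lt_range.imp (fun h _ => by exact_mod_cast h)
    -- A's bubble result
    have hA := brec_sorted key (n - 1) l0 (by omega) hl0T
      (by
        intro x hx y hy
        have : l0.drop (n - 1 + 1) = [] := by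
          apply List.drop_eq_nil_of_le; omega
        rw [this] at hy
        simp at hy)
      (by
        have : l0.drop (n - 1 + 1) = [] := by
          apply List.drop_eq_nil_of_le; omega
        rw [this]; exact List.Pairwise.nil)
    -- B's sorted result
    have hB : (PySem.List.sorted l0 key true).Pairwise (keyR key) := sortedRev_pairwiseR key l0 hl0T
    have hBperm : (PySem.List.sorted l0 key true).Perm l0 := PySem.List.sorted_perm l0 key true
    have hQO : brec key (n - 1) l0 = PySem.List.sorted l0 key true := by
      refine List.Perm.eq_of_pairwise (fun a b _ _ h1 h2 => keyR_antisymm key a b h1 h2)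
        hA.2 hB (hA.1.trans hBperm.symm)
    -- final row rebuild
    simp only [PySem.List.foldl_append_singleton_eq_map, List.nil_append]
    have hQlen : PySem.List.len (brec key (n - 1) l0) = (n : Int) := by
      simp [PySem.List.len, hA.1.length_eq, hl0len]
    have hQmap : List.map (fun i => PySem.List.pyGetD (brec key (n - 1) l0) i 0) l0 = brec key (n - 1) l0 := by
      have := PySem.List.map_pyGetD_pyRange_zero (brec key (n - 1) l0) 0
      rw [hQlen] at this
      exact this
    calc List.map (fun i => List.map (fun j =>
          PySem.List.pyGetD (PySem.List.pyGetD list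
            (PySem.List.pyGetD (brec key (n - 1) l0, (brec key (n - 1) l0).map key).1 i 0) []) j 0) l0) l0
        = List.map ((fun r => List.map (fun j =>
            PySem.List.pyGetD (PySem.List.pyGetD list r []) j 0) l0) ∘
            (fun i => PySem.List.pyGetD (brec key (n - 1) l0) i 0)) l0 := rfl
      _ = List.map (fun r => List.map (fun j =>
            PySem.List.pyGetD (PySem.List.pyGetD list r []) j 0) l0)
            (List.map (fun i => PySem.List.pyGetD (brec key (n - 1) l0) i 0) l0) := by
            rw [List.map_map]
      _ = List.map (fun r => List.map (fun j =>
            PySem.List.pyGetD (PySem.List.pyGetD list r []) j 0) l0) (brec key (n - 1) l0) := by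
            rw [hQmap]
      _ = List.map (fun r => List.map (fun j =>
            PySem.List.pyGetD (PySem.List.pyGetD list r []) j 0) l0) (PySem.List.sorted l0 key true) := by
            rw [hQO]
  · -- level ≤ 0: all ranges are empty, both sides are []
    have h0 : PySem.List.pyRange 0 level = [] := by
      apply List.eq_nil_iff_forall_not_mem.mpr
      intro x hx
      have := (PySem.List.mem_pyRange_one).mp hx
      omega
    have h1 : PySem.List.pyRange 0 (level - 1) = [] := by
      apply List.eq_nil_iff_forall_not_mem.mpr
      intro x hx
      have := (PySem.List.mem_pyRange_one).mp hx
      omega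
    rw [swapRow, swapRow_alt, h0, h1]
    rfl

-- ===== VERDICT (by name: the statement is the Claim_ definition above) =====
theorem swapRow_spec : Claim_equal_swapRow := by
  intro list level _ _
  exact main_eq list level
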